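-- pv_equiv track=rewrite | github.com/PrithwishJana/CoTran | transpilers/TSS_CodeConv_PyTranslations/655/GFG.py | maxPrimefactorNum
-- ===== SOURCE A (Python) =====
-- def maxPrimefactorNum(N):
--     if N < 2:
--         return 0
--     arr = [False for _ in range(N + 1)]
--     prod = 1
--     res = 0
--     p = 2
--     while p * p <= N:
--         if arr [p] == False:
--             for i in range(p * 2, N + 1, p):
--                 arr [i] = True
--             prod *= p
--             if prod > N:
--                 return res
--             res += 1
--         p += 1
--     return res
-- ===== SOURCE B (Python) =====
-- def _is_prime(p):
--     d = 2
--     while d * d <= p: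
--         if p % d == 0:
--             return False
--         d += 1
--     return True
--
--
-- def maxPrimefactorNum(N):
--     # No sieve: walk consecutive integers, test primality by trial division;
--     # the running product of primes exceeds N after a handful of primes, so
--     # no O(N) array is ever built.
--     if N < 2:
--         return 0
--     prod = 1
--     res = 0
--     p = 2
--     while p * p <= N:
--         if _is_prime(p):
--             prod *= p
--             if prod > N:
--                 return res
--             res += 1
--         p += 1
--     return res
-- ===== Notes on version B (the rewrite author's own statement) =====
-- stated objective: faster
-- what changed: Replaced the O(N)-memory Eratosthenes sieve with direct trial-division primality tests on consecutive integers; since the running prime product exceeds N after at most ~9 primes, the loop terminates after a few dozen iterations and no array is built.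
import Mathlib
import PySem

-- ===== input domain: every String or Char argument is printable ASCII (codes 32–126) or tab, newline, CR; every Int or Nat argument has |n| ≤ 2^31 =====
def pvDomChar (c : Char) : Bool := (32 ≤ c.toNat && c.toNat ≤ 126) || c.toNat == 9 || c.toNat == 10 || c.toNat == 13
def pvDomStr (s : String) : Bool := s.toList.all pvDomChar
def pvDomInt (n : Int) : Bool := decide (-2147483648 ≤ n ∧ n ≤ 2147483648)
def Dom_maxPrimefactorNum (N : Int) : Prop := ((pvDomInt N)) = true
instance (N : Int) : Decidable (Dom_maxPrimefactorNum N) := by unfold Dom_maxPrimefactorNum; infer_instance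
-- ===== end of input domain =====

-- B replaces A's O(N)-memory Eratosthenes sieve by trial-division primality tests on
-- consecutive integers (the running prime product exceeds N after a few primes), faster.

-- termination helpers cited by the ports' decreasing_by
theorem pv_le_mul_self (p : Int) : p ≤ p * p := by
  by_cases h : p ≤ 0
  · nlinarith
  · nlinarith

theorem pv_dec {N p : Int} (h : p * p ≤ N) : (N + 1 - (p + 1)).toNat < (N + 1 - p).toNat := by
  have := pv_le_mul_self p; omega

-- ===== PORT A =====
-- the sieve-and-count while loop: mark multiples, multiply fresh primes into prod
def pvLoopA (N : Int) (arr : List Bool) (prod res p : Int) : Int :=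
  if _h : p * p ≤ N then
    if PySem.List.pyGet? arr p = some false then
      if prod * p > N then res
      else
        pvLoopA N
          ((PySem.List.pyRange (p * 2) (N + 1) p).foldl
            (fun a i => PySem.List.pySetD a i true) arr)
          (prod * p) (res + 1) (p + 1)
    else pvLoopA N arr prod res (p + 1)
  else res
termination_by (N + 1 - p).toNat
decreasing_by
  all_goals exact pv_dec _h

def maxPrimefactorNum (N : Int) : Int :=
  if N < 2 then 0
  else pvLoopA N ((PySem.List.pyRange 0 (N + 1) 1).map (fun _ => false)) 1 0 2

-- ===== PORT B =====
-- trial division: d increasing while d*d ≤ p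
def pvTrial (p d : Int) : Bool :=
  if _h : d * d ≤ p then
    if PySem.Int.mod p d = 0 then false else pvTrial p (d + 1)
  else true
termination_by (p + 1 - d).toNat
decreasing_by
  exact pv_dec _h
def pvLoopB (N prod res p : Int) : Int :=
  if _h : p * p ≤ N then
    if pvTrial p 2 then
      if prod * p > N then res
      else pvLoopB N (prod * p) (res + 1) (p + 1)
    else pvLoopB N prod res (p + 1)
  else res
termination_by (N + 1 - p).toNat
decreasing_by
  all_goals exact pv_dec _h

def maxPrimefactorNum_alt (N : Int) : Int :=
  if N < 2 then 0 else pvLoopB N 1 0 2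

-- ===== PRECONDITION & SPEC =====
def Spec_maxPrimefactorNum (N : Int) (out : Int) : Prop := out = maxPrimefactorNum_alt N
instance (N : Int) (out : Int) : Decidable (Spec_maxPrimefactorNum N out) := by unfold Spec_maxPrimefactorNum; infer_instance

-- ===== CLAIM (what is proved, stated in full; the proofs are below) =====
def Claim_equal_maxPrimefactorNum : Prop := ∀ (N : Int), Dom_maxPrimefactorNum N → Spec_maxPrimefactorNum N (maxPrimefactorNum N)

-- ===== LEMMAS AND PROOFS =====

-- the sieve invariant: a cell is marked iff some prime below p marks it
def pvInv (arr : List Bool) (p : Int) : Prop :=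
  ∀ (j : Nat) (hj : j < arr.length),
    (arr[j] = true ↔ ∃ q : Nat, 2 ≤ q ∧ (q : Int) < p ∧ Nat.Prime q ∧ q ∣ j ∧ 2 * q ≤ j)

theorem pvTrial_iff (p d : Int) (hd : 2 ≤ d) :
    pvTrial p d = true ↔ ∀ m : Int, d ≤ m → m * m ≤ p → ¬ m ∣ p := by
  revert hd
  induction d using pvTrial.induct (p := p) with
  | case1 d h hmod =>
    intro hd
    rw [pvTrial, dif_pos h, if_pos hmod]
    simp only [Bool.false_eq_true, false_iff]
    push Not
    exact ⟨d, le_refl d, h, (PySem.Int.mod_eq_zero_iff_dvd p d).mp hmod⟩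
  | case2 d h hmod ih =>
    intro hd
    have ih := ih (by omega)
    rw [pvTrial, dif_pos h, if_neg hmod]
    rw [ih]
    constructor
    · intro H m hm hmm
      rcases eq_or_lt_of_le hm with rfl | hlt
      · intro hdvd; exact hmod ((PySem.Int.mod_eq_zero_iff_dvd p d).mpr hdvd)
      · exact H m (by omega) hmm
    · intro H m hm hmm; exact H m (by omega) hmm
  | case3 d h =>
    intro hd
    rw [pvTrial, dif_neg h]
    simp only [true_iff]
    intro m hm hmm hdvd
    have : d * d ≤ m * m := by nlinarith
    omega

theorem pvTrial_prime (p : Int) (hp : 2 ≤ p) :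
    pvTrial p 2 = true ↔ Nat.Prime p.toNat := by
  rw [pvTrial_iff p 2 le_rfl]
  have hp0 : (p.toNat : Int) = p := Int.toNat_of_nonneg (by omega)
  rw [Nat.prime_def_le_sqrt]
  constructor
  · intro H
    refine ⟨by omega, ?_⟩
    intro m hm hms hdvd
    refine H (m : Int) (by exact_mod_cast hm) ?_ ?_
    · have h1 : m * m ≤ p.toNat := Nat.le_sqrt.mp hms
      calc (m : Int) * m = ((m * m : Nat) : Int) := by push_cast; ring
        _ ≤ (p.toNat : Int) := by exact_mod_cast h1
        _ = p := hp0
    · rw [← hp0]; exact_mod_cast hdvd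
  · rintro ⟨h2, H⟩ m hm hmm hdvd
    have hm0 : 0 ≤ m := by omega
    refine H m.toNat (by omega) ?_ ?_
    · rw [Nat.le_sqrt]
      have : ((m.toNat * m.toNat : Nat) : Int) ≤ ((p.toNat : Nat) : Int) := by
        push_cast
        rw [Int.toNat_of_nonneg hm0, hp0]; exact hmm
      exact_mod_cast this
    · have : (m.toNat : Int) ∣ (p.toNat : Int) := by
        rw [Int.toNat_of_nonneg hm0, hp0]; exact hdvd
      exact_mod_cast this

theorem pv_not_prime_iff (n : Nat) (hn : 2 ≤ n) :
    ¬ Nat.Prime n ↔ ∃ q : Nat, 2 ≤ q ∧ q < n ∧ Nat.Prime q ∧ q ∣ n ∧ 2 * q ≤ n := by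
  constructor
  · intro hnp
    have h1 : n ≠ 1 := by omega
    have hq : Nat.Prime n.minFac := Nat.minFac_prime h1
    have hdvd : n.minFac ∣ n := Nat.minFac_dvd n
    have hle : n.minFac ≤ n := Nat.le_of_dvd (by omega) hdvd
    have hne : n.minFac ≠ n := by
      intro he
      exact hnp ((Nat.prime_def_minFac).mpr ⟨hn, he⟩)
    have hlt : n.minFac < n := lt_of_le_of_ne hle hne
    have h2q : 2 ≤ n.minFac := hq.two_le
    refine ⟨n.minFac, h2q, hlt, hq, hdvd, ?_⟩
    obtain ⟨k, hk⟩ := hdvd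
    have hk2 : 2 ≤ k := by
      rcases Nat.lt_or_ge k 2 with h | h
      · interval_cases k <;> omega
      · exact h
    nlinarith [hk, hk2, h2q]
  · rintro ⟨q, h2, hlt, _, hdvd, _⟩ hpr
    rcases (hpr.eq_one_or_self_of_dvd q hdvd) with h | h <;> omega

theorem pv_foldl_set_length (idxs : List Int) (arr : List Bool) :
    (idxs.foldl (fun a i => PySem.List.pySetD a i true) arr).length = arr.length := by
  induction idxs generalizing arr with
  | nil => rfl
  | cons i t ih =>
    simp only [List.foldl_cons]
    rw [ih, PySem.List.length_pySetD]

theorem pv_foldl_set_get (idxs : List Int) (h0 : ∀ i ∈ idxs, 0 ≤ i) (arr : List Bool)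
    (j : Nat) (hj : j < arr.length)
    (hj' : j < (idxs.foldl (fun a i => PySem.List.pySetD a i true) arr).length) :
    ((idxs.foldl (fun a i => PySem.List.pySetD a i true) arr)[j] = true ↔
      arr[j] = true ∨ ∃ i ∈ idxs, i.toNat = j) := by
  induction idxs generalizing arr with
  | nil => simp
  | cons i t ih =>
    simp only [List.foldl_cons] at hj' ⊢
    have hi0 : 0 ≤ i := h0 i (by simp)
    have hset : PySem.List.pySetD arr i true = arr.set i.toNat true :=
      PySem.List.pySetD_of_nonneg arr true hi0
    have hlen : (PySem.List.pySetD arr i true).length = arr.length :=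
      PySem.List.length_pySetD arr i true
    rw [ih (fun x hx => h0 x (by simp [hx])) _ (by omega) hj']
    simp only [hset, List.getElem_set]
    by_cases he : i.toNat = j
    · rw [if_pos he]
      simp only [List.mem_cons, true_or, true_iff]
      right; exact ⟨i, Or.inl rfl, he⟩
    · rw [if_neg he]
      simp only [List.mem_cons]
      constructor
      · rintro (h | ⟨x, hx, hxe⟩)
        · exact Or.inl h
        · exact Or.inr ⟨x, Or.inr hx, hxe⟩
      · rintro (h | ⟨x, hx, hxe⟩)
        · exact Or.inl h
        · rcases hx with rfl | hx
          · exact absurd hxe he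
          · exact Or.inr ⟨x, hx, hxe⟩

theorem pv_test (N p : Int) (arr : List Bool) (hp : 2 ≤ p) (hpp : p * p ≤ N)
    (hlen : arr.length = (N + 1).toNat) (hinv : pvInv arr p) :
    (PySem.List.pyGet? arr p = some false) ↔ pvTrial p 2 = true := by
  have hple : p ≤ N := le_trans (pv_le_mul_self p) hpp
  have hjr : p.toNat < arr.length := by omega
  rw [PySem.List.pyGet?_of_nonneg arr (by omega : (0:Int) ≤ p)]
  rw [List.getElem?_eq_getElem hjr]
  rw [pvTrial_prime p hp]
  have hinv' := hinv p.toNat hjr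
  constructor
  · intro hfalse
    have hne : ¬ arr[p.toNat] = true := by
      simp at hfalse; simp [hfalse]
    by_contra hnp
    rw [pv_not_prime_iff p.toNat (by omega)] at hnp
    obtain ⟨q, h2, hlt, hpr, hdvd, h2q⟩ := hnp
    exact hne (hinv'.mpr ⟨q, h2, by omega, hpr, hdvd, h2q⟩)
  · intro hprime
    have : ¬ arr[p.toNat] = true := by
      rw [hinv']
      rintro ⟨q, h2, hlt, hpr, hdvd, h2q⟩
      have : q < p.toNat := by omega
      exact ((pv_not_prime_iff p.toNat (by omega)).mpr ⟨q, h2, this, hpr, hdvd, h2q⟩) hprime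
    simp at this; simp [this]

theorem pv_inv_step_comp (arr : List Bool) (p : Int) (hp : 2 ≤ p)
    (hnp : ¬ Nat.Prime p.toNat) (hinv : pvInv arr p) : pvInv arr (p + 1) := by
  intro j hj
  rw [hinv j hj]
  constructor
  · rintro ⟨q, h2, hlt, hpr, hdvd, h2q⟩
    exact ⟨q, h2, by omega, hpr, hdvd, h2q⟩
  · rintro ⟨q, h2, hlt, hpr, hdvd, h2q⟩
    refine ⟨q, h2, ?_, hpr, hdvd, h2q⟩
    rcases lt_or_eq_of_le (by omega : (q : Int) ≤ p) with h | h
    · exact h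
    · exfalso; apply hnp
      have : q = p.toNat := by omega
      exact this ▸ hpr

theorem pv_inv_step_prime (N : Int) (arr : List Bool) (p : Int) (hp : 2 ≤ p)
    (hpp : p * p ≤ N) (hlen : arr.length = (N + 1).toNat)
    (hprime : Nat.Prime p.toNat) (hinv : pvInv arr p) :
    pvInv ((PySem.List.pyRange (p * 2) (N + 1) p).foldl
      (fun a i => PySem.List.pySetD a i true) arr) (p + 1) := by
  have hppos : (0:Int) < p := by omega
  have h0 : ∀ i ∈ PySem.List.pyRange (p * 2) (N + 1) p, (0:Int) ≤ i := by
    intro i hi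
    have := (PySem.List.mem_pyRange_iff_of_pos hppos i).mp hi
    omega
  intro j hj
  have hjlen : j < arr.length := by rw [← pv_foldl_set_length (PySem.List.pyRange (p * 2) (N + 1) p) arr]; exact hj
  rw [pv_foldl_set_get _ h0 arr j hjlen hj]
  rw [hinv j hjlen]
  have hjN : (j : Int) < N + 1 := by omega
  have hcast : ((p.toNat : Int)) = p := Int.toNat_of_nonneg (by omega)
  constructor
  · rintro (⟨q, h2, hlt, hpr, hdvd, h2q⟩ | ⟨i, hi, hie⟩)
    · exact ⟨q, h2, by omega, hpr, hdvd, h2q⟩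
    · have hm := (PySem.List.mem_pyRange_iff_of_pos hppos i).mp hi
      have hi0 : (0:Int) ≤ i := by omega
      have hij : i = (j : Int) := by omega
      subst hij
      refine ⟨p.toNat, by omega, by omega, hprime, ?_, by omega⟩
      have hd : p ∣ (j : Int) := by
        have h2p : p ∣ p * 2 := Dvd.intro_left 2 (by ring)
        have hsum := dvd_add hm.2.2 h2p
        simpa using hsum
      have : (p.toNat : Int) ∣ ((j : Nat) : Int) := by rw [hcast]; exact hd
      exact_mod_cast this
  · rintro ⟨q, h2, hlt, hpr, hdvd, h2q⟩
    by_cases hq : (q : Int) < p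
    · exact Or.inl ⟨q, h2, hq, hpr, hdvd, h2q⟩
    · have hqp : q = p.toNat := by omega
      subst hqp
      right
      refine ⟨(j : Int), ?_, by omega⟩
      rw [PySem.List.mem_pyRange_iff_of_pos hppos]
      have hd : p ∣ (j : Int) := by
        have hc : ((p.toNat : Nat) : Int) ∣ ((j : Nat) : Int) := by exact_mod_cast hdvd
        rwa [hcast] at hc
      have h2p : p ∣ p * 2 := Dvd.intro_left 2 (by ring)
      exact ⟨by omega, hjN, dvd_sub hd h2p⟩

theorem pv_lockstep (N : Int) (arr : List Bool) (prod res p : Int)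
    (hp : 2 ≤ p) (hlen : arr.length = (N + 1).toNat) (hinv : pvInv arr p) :
    pvLoopA N arr prod res p = pvLoopB N prod res p := by
  induction arr, prod, res, p using pvLoopA.induct (N := N) with
  | case1 arr prod res p h hg hgt =>
    have htrial : pvTrial p 2 = true := (pv_test N p arr hp h hlen hinv).mp hg
    rw [pvLoopA, pvLoopB]
    rw [dif_pos h, dif_pos h, if_pos hg, if_pos htrial, if_pos hgt, if_pos hgt]
  | case2 arr prod res p h hg hgt ih =>
    have htrial : pvTrial p 2 = true := (pv_test N p arr hp h hlen hinv).mp hg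
    have hprime : Nat.Prime p.toNat := (pvTrial_prime p hp).mp htrial
    rw [pvLoopA, pvLoopB]
    rw [dif_pos h, dif_pos h, if_pos hg, if_pos htrial, if_neg hgt, if_neg hgt]
    exact ih (by omega)
      (by rw [pv_foldl_set_length]; exact hlen)
      (pv_inv_step_prime N arr p hp h hlen hprime hinv)
  | case3 arr prod res p h hg ih =>
    have htrial : ¬ pvTrial p 2 = true := fun ht => hg ((pv_test N p arr hp h hlen hinv).mpr ht)
    rw [pvLoopA, pvLoopB]
    rw [dif_pos h, dif_pos h, if_neg hg, if_neg (by simpa using htrial)]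
    have hnp : ¬ Nat.Prime p.toNat := fun hpr => htrial ((pvTrial_prime p hp).mpr hpr)
    exact ih (by omega) hlen (pv_inv_step_comp arr p hp hnp hinv)
  | case4 arr prod res p h =>
    rw [pvLoopA, pvLoopB]
    rw [dif_neg h, dif_neg h]

theorem pv_main (N : Int) : maxPrimefactorNum N = maxPrimefactorNum_alt N := by
  rw [maxPrimefactorNum, maxPrimefactorNum_alt]
  by_cases hN : N < 2
  · rw [if_pos hN, if_pos hN]
  · rw [if_neg hN, if_neg hN]
    apply pv_lockstep N _ 1 0 2 (by omega)
    · rw [List.length_map, PySem.List.length_pyRange_one]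
      norm_num
    · intro j hj
      have hfalse : ((PySem.List.pyRange 0 (N + 1) 1).map (fun _ => false))[j] = false := by
        simp
      rw [hfalse]
      simp only [Bool.false_eq_true, false_iff]
      rintro ⟨q, h2, hlt, _⟩
      omega

-- ===== VERDICT (by name: the statement is the Claim_ definition above) =====
theorem maxPrimefactorNum_spec : Claim_equal_maxPrimefactorNum := by
  intro N _
  unfold Spec_maxPrimefactorNum
  exact pv_main N
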